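-- pv_equiv track=rewrite | github.com/uppeabhishek/CSCI6057-CODECLONEDETECTION | CodeRepeats/BellerAlgorithm/MaximalRepeats.py | get_same_prefix_sum_array
-- ===== SOURCE A (Python) =====
-- def get_same_prefix_sum_array(bwt):
--     array = [1] * len(bwt)
--     for i in range(1, len(bwt)):
--         if bwt[i] == bwt[i - 1]:
--             array[i] = array[i - 1]
--         else:
--             array[i] = array[i - 1] + 1
--     return array
-- ===== SOURCE B (Python) =====
-- def get_same_prefix_sum_array(bwt):
--     out = []
--     label = 0
--     rest = bwt
--     while rest:
--         c = rest[0]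
--         k = 1
--         while k < len(rest) and rest[k] == c:
--             k += 1
--         label += 1
--         out.extend([label] * k)
--         rest = rest[k:]
--     return out
-- ===== Notes on version B (the rewrite author's own statement) =====
-- stated objective: alternative
-- what changed: B traverses maximal runs of equal characters (inner scan finds each run's length, then the run's label is emitted run-length times) instead of A's per-index loop carrying array[i-1]; no array of length n is pre-allocated and mutated.
import Mathlib
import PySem

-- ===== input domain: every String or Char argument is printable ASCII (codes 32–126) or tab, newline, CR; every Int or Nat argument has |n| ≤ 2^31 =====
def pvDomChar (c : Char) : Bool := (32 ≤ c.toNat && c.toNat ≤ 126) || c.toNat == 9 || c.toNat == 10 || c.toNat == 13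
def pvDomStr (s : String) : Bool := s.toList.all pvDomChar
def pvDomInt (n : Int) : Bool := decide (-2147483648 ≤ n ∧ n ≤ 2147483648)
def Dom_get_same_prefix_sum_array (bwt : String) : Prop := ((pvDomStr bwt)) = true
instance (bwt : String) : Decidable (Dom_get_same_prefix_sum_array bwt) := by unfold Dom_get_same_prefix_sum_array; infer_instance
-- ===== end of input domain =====

-- B traverses the string run by run (inner scan for the run length, then the run's
-- label is emitted run-length times) instead of A's per-index loop carrying array[i-1]. Objective: alternative.

-- ===== PORT A =====
def get_same_prefix_sum_array (bwt : String) : List Int :=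
  let l := bwt.toList
  let arr := List.replicate l.length (1 : Int)
  (PySem.List.pyRange 1 (l.length : Int) 1).foldl (fun arr i =>
    if PySem.List.pyGetD l i ' ' == PySem.List.pyGetD l (i - 1) ' ' then
      PySem.List.pySetD arr i (PySem.List.pyGetD arr (i - 1) 0)
    else
      PySem.List.pySetD arr i (PySem.List.pyGetD arr (i - 1) 0 + 1)) arr

-- ===== PORT B =====
-- length of the maximal run of c at the front of l (Source B's inner while loop, scanning from rest[1])
def pvRunLen (c : Char) (l : List Char) : Nat :=
  match l with
  | [] => 0
  | x :: xs => if x == c then pvRunLen c xs + 1 else 0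

-- Source B's outer while loop: emit the next label k times, continue on the remainder
def pvAltGo (rest : List Char) (label : Int) : List Int :=
  match rest with
  | [] => []
  | c :: tail =>
    let k := pvRunLen c tail + 1
    List.replicate k (label + 1) ++ pvAltGo ((c :: tail).drop k) (label + 1)
termination_by rest.length
decreasing_by simp [List.length_drop]

def get_same_prefix_sum_array_alt (bwt : String) : List Int :=
  pvAltGo bwt.toList 0

-- ===== PRECONDITION & SPEC =====
def Spec_get_same_prefix_sum_array (bwt : String) (out : List Int) : Prop := out = get_same_prefix_sum_array_alt bwt
instance (bwt : String) (out : List Int) : Decidable (Spec_get_same_prefix_sum_array bwt out) := by unfold Spec_get_same_prefix_sum_array; infer_instance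

-- ===== CLAIM (what is proved, stated in full; the proofs are below) =====
def Claim_equal_get_same_prefix_sum_array : Prop := ∀ (bwt : String), Dom_get_same_prefix_sum_array bwt → Spec_get_same_prefix_sum_array bwt (get_same_prefix_sum_array bwt)

-- ===== LEMMAS AND PROOFS =====

theorem pvAltGo_nil (lab : Int) : pvAltGo [] lab = [] := by
  rw [pvAltGo.eq_def]

theorem pvAltGo_cons (c : Char) (tail : List Char) (lab : Int) :
    pvAltGo (c :: tail) lab =
      List.replicate (pvRunLen c tail + 1) (lab + 1) ++ pvAltGo (tail.drop (pvRunLen c tail)) (lab + 1) := by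
  rw [pvAltGo.eq_def]
  simp

-- reference result: the label stream produced one position at a time
def pvG (prev : Char) (l : List Char) (lab : Int) : List Int :=
  match l with
  | [] => []
  | c :: rest =>
    let lab' := if c == prev then lab else lab + 1
    lab' :: pvG c rest lab'

def pvOut (l : List Char) : List Int :=
  match l with
  | [] => []
  | c :: rest => 1 :: pvG c rest 1

theorem pvG_length (l : List Char) : ∀ (prev : Char) (lab : Int), (pvG prev l lab).length = l.length := by
  induction l with
  | nil => intro prev lab; simp [pvG]
  | cons c rest ih => intro prev lab; simp [pvG, ih]

theorem pvOut_length (l : List Char) : (pvOut l).length = l.length := by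
  cases l with
  | nil => simp [pvOut]
  | cons c rest => simp [pvOut, pvG_length]

theorem pvG_eq (l : List Char) : ∀ (c : Char) (lab : Int),
    pvG c l lab = List.replicate (pvRunLen c l) lab ++ pvAltGo (l.drop (pvRunLen c l)) lab := by
  induction l with
  | nil => intro c lab; simp [pvG, pvRunLen, pvAltGo_nil]
  | cons x xs ih =>
    intro c lab
    by_cases h : x = c
    · subst h
      simp [pvG, pvRunLen, List.replicate_succ, ih x lab]
    · have hx : (x == c) = false := by simp [h]
      simp only [pvG, pvRunLen, hx, Bool.false_eq_true, if_false, List.replicate_zero,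
        List.drop_zero, List.nil_append]
      rw [pvAltGo_cons, ih x (lab + 1)]
      simp [List.replicate_succ]

theorem pvAltGo_eq_pvOut (l : List Char) : pvAltGo l 0 = pvOut l := by
  cases l with
  | nil => simp [pvAltGo_nil, pvOut]
  | cons c rest =>
    rw [pvAltGo_cons, pvOut]
    simp only [List.replicate_succ, List.cons_append, zero_add]
    rw [pvG_eq rest c 1]

theorem pvG_head (l : List Char) (prev : Char) (lab : Int) (h : l ≠ []) :
    (pvG prev l lab).getD 0 0 = lab + (if l.getD 0 ' ' == prev then 0 else 1) := by
  cases l with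
  | nil => exact absurd rfl h
  | cons c rest =>
    by_cases hc : (c == prev) = true <;> simp [pvG, hc]

theorem pvG_succ (l : List Char) : ∀ (prev : Char) (lab : Int) (m : Nat), m + 1 < l.length →
    (pvG prev l lab).getD (m + 1) 0 =
      (pvG prev l lab).getD m 0 + (if l.getD (m + 1) ' ' == l.getD m ' ' then 0 else 1) := by
  induction l with
  | nil => intro prev lab m h; simp at h
  | cons x xs ih =>
    intro prev lab m h
    cases m with
    | zero =>
      have hxs : xs ≠ [] := by
        cases xs with
        | nil => simp at h
        | cons a b => simp
      simp only [pvG, List.getD_cons_succ, List.getD_cons_zero]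
      rw [pvG_head xs x _ hxs]
    | succ m' =>
      simp only [pvG, List.getD_cons_succ]
      exact ih x _ m' (by simpa using h)

theorem pvOut_succ (l : List Char) (m : Nat) (h : m + 1 < l.length) :
    (pvOut l).getD (m + 1) 0 =
      (pvOut l).getD m 0 + (if l.getD (m + 1) ' ' == l.getD m ' ' then 0 else 1) := by
  cases l with
  | nil => simp at h
  | cons c rest =>
    cases m with
    | zero =>
      have hr : rest ≠ [] := by
        cases rest with
        | nil => simp at h
        | cons a b => simp
      simp only [pvOut, List.getD_cons_succ, List.getD_cons_zero]
      rw [pvG_head rest c 1 hr]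
    | succ m' =>
      simp only [pvOut, List.getD_cons_succ]
      exact pvG_succ rest c 1 m' (by simpa using h)

-- the A-side loop body, with the char list fixed
def pvStep (l : List Char) (arr : List Int) (i : Int) : List Int :=
  if PySem.List.pyGetD l i ' ' == PySem.List.pyGetD l (i - 1) ' ' then
    PySem.List.pySetD arr i (PySem.List.pyGetD arr (i - 1) 0)
  else
    PySem.List.pySetD arr i (PySem.List.pyGetD arr (i - 1) 0 + 1)

theorem pvSetAppendLen {α : Type} (l1 l2 : List α) (n : Nat) (h : l1.length = n) (v : α) :
    (l1 ++ l2).set n v = l1 ++ l2.set 0 v := by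
  subst h
  rw [List.set_append_right _ _ (le_refl _)]
  simp

theorem pvInv (l : List Char) (m : Nat) (hm : m < l.length) :
    (PySem.List.pyRange 1 ((m : Int) + 1) 1).foldl (pvStep l) (List.replicate l.length (1 : Int)) =
      (pvOut l).take (m + 1) ++ List.replicate (l.length - (m + 1)) (1 : Int) := by
  induction m with
  | zero =>
    rw [PySem.List.pyRange_one_eq_nil (by omega)]
    cases l with
    | nil => simp at hm
    | cons c rest => simp [pvOut, List.replicate_succ]
  | succ m' ih =>
    have hm' : m' < l.length := by omega
    have hlen : (pvOut l).length = l.length := pvOut_length l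
    have hsplit : PySem.List.pyRange 1 (((m' + 1 : Nat) : Int) + 1) 1 =
        PySem.List.pyRange 1 ((m' : Int) + 1) 1 ++ [((m' : Int) + 1)] := by
      have h2 : ((m' + 1 : Nat) : Int) + 1 = ((m' : Int) + 1) + 1 := by push_cast; ring
      rw [h2, PySem.List.pyRange_one_succ_right (by omega)]
    rw [hsplit, List.foldl_append, ih hm']
    -- one more loop step, at index m' + 1
    have hTlen : ((pvOut l).take (m' + 1)).length = m' + 1 := by
      simp [hlen]; omega
    have hcast : ((m' : Int) + 1) = (((m' + 1 : Nat)) : Int) := by push_cast; ring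
    have hsub : ((m' : Int) + 1) - 1 = ((m' : Nat) : Int) := by omega
    have hget1 : PySem.List.pyGetD l ((m' : Int) + 1) ' ' = l.getD (m' + 1) ' ' := by
      rw [hcast, PySem.List.pyGetD_natCast]
    have hget0 : PySem.List.pyGetD l ((m' : Nat) : Int) ' ' = l.getD m' ' ' := by
      rw [PySem.List.pyGetD_natCast]
    have hprev : PySem.List.pyGetD
        ((pvOut l).take (m' + 1) ++ List.replicate (l.length - (m' + 1)) (1 : Int)) ((m' : Nat) : Int) 0
        = (pvOut l).getD m' 0 := by
      rw [PySem.List.pyGetD_natCast]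
      rw [List.getD_append _ _ _ _ (by omega)]
      simp [List.getD_eq_getElem?_getD]
    have hset : ∀ (v : Int),
        PySem.List.pySetD
          ((pvOut l).take (m' + 1) ++ List.replicate (l.length - (m' + 1)) (1 : Int)) ((m' : Int) + 1) v
        = (pvOut l).take (m' + 1) ++ (List.replicate (l.length - (m' + 1)) (1 : Int)).set 0 v := by
      intro v
      rw [hcast, PySem.List.pySetD_natCast]
      exact pvSetAppendLen _ _ _ hTlen v
    have hrep : ∀ (v : Int), (List.replicate (l.length - (m' + 1)) (1 : Int)).set 0 v
        = v :: List.replicate (l.length - (m' + 2)) (1 : Int) := by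
      intro v
      cases hk : l.length - (m' + 1) with
      | zero => omega
      | succ k' =>
        have hk' : l.length - (m' + 2) = k' := by omega
        simp [List.replicate_succ, hk']
    have htake : (pvOut l).take (m' + 2) = (pvOut l).take (m' + 1) ++ [(pvOut l).getD (m' + 1) 0] := by
      rw [List.take_add_one]
      have hlt : m' + 1 < (pvOut l).length := by omega
      simp [List.getD_eq_getElem?_getD, List.getElem?_eq_getElem hlt]
    have hstepval := pvOut_succ l m' hm
    simp only [List.foldl_cons, List.foldl_nil, pvStep]
    rw [hsub, hget1, hget0, hprev, hset, hset]
    by_cases hc : (l.getD (m' + 1) ' ' == l.getD m' ' ') = true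
    · rw [if_pos hc]
      rw [show (m' + 1 + 1) = m' + 2 from rfl, htake, hrep]
      rw [hstepval, if_pos hc, add_zero]
      simp
    · rw [if_neg hc]
      rw [show (m' + 1 + 1) = m' + 2 from rfl, htake, hrep]
      rw [hstepval, if_neg hc]
      simp

-- ===== VERDICT (by name: the statement is the Claim_ definition above) =====
theorem get_same_prefix_sum_array_spec : Claim_equal_get_same_prefix_sum_array := by
  intro bwt _
  unfold Spec_get_same_prefix_sum_array get_same_prefix_sum_array get_same_prefix_sum_array_alt
  rw [pvAltGo_eq_pvOut]
  cases hl : bwt.toList with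
  | nil => simp [PySem.List.pyRange_one_eq_nil, pvOut]
  | cons c rest =>
    have hfold : (PySem.List.pyRange 1 ((c :: rest).length : Int) 1).foldl (pvStep (c :: rest))
        (List.replicate (c :: rest).length (1 : Int)) = pvOut (c :: rest) := by
      have hn : 0 < (c :: rest).length := by simp
      have hcast : ((c :: rest).length : Int) = (((c :: rest).length - 1 : Nat) : Int) + 1 := by
        push_cast [Nat.cast_sub hn]; ring
      rw [hcast, pvInv (c :: rest) ((c :: rest).length - 1) (by omega)]
      have h1 : (c :: rest).length - 1 + 1 = (c :: rest).length := by omega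
      rw [h1]
      simp [← pvOut_length (c :: rest)]
    exact hfold.symm ▸ rfl
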